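-- pv_equiv track=rewrite | github.com/aziza0606/test | uygavazifa/5.py | func
-- ===== SOURCE A (Python) =====
-- def func(lst):
--     kam={}
--     for i in lst:
--         if i in kam:
--             kam[i]+=1
--         else:
--             kam[i]=1
--
--     eng_kam=min(kam,key=kam.get)
--     eng_kam=kam[eng_kam]
--
--     return eng_kam
-- ===== SOURCE B (Python) =====
-- def func(lst):
--     # Sort-then-scan: in sorted order equal values are contiguous, so the
--     # minimum frequency is the length of the shortest run of equal elements.
--     best = None
--     run = 0
--     prev = None
--     for x in sorted(lst):
--         if run > 0 and x == prev:
--             run += 1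
--         else:
--             if run > 0 and (best is None or run < best):
--                 best = run
--             run = 1
--             prev = x
--     if run == 0:
--         raise ValueError("min() arg is an empty sequence")
--     if best is None or run < best:
--         best = run
--     return best
-- ===== Notes on version B (the rewrite author's own statement) =====
-- stated objective: alternative
-- what changed: A builds a frequency dictionary in one pass and takes min over its keys by value; B sorts the list and scans it once for the shortest run of equal (hence contiguous) elements, maintaining no table at all.
import Mathlib
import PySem

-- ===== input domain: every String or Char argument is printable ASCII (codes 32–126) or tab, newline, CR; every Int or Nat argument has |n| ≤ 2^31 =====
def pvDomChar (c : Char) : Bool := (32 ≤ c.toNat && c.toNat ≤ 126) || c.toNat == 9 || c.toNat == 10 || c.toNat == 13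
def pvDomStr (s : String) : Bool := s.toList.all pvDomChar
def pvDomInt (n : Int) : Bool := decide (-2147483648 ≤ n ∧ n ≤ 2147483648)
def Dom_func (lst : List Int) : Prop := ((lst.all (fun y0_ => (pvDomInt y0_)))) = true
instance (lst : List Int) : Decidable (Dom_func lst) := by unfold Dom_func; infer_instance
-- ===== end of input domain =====

-- B replaces A's frequency-dict build + min-by-key by sorting the list and scanning it
-- once for the shortest run of equal (hence contiguous) elements (objective: alternative).

-- ===== PORT A =====
-- builds the frequency dict, then min(kam, key=kam.get), then looks up its count;
-- the `.getD … 0` / `| none => 0` defaults are unreachable under Pre_ (lst ≠ []).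
def func (lst : List Int) : Int :=
  let kam : PySem.Dict Int Int :=
    lst.foldl (fun d i => if d.contains i then d.modify i 0 (· + 1) else d.insert i 1)
      PySem.Dict.empty
  match PySem.List.min? kam.keys (fun k => kam.getD k 0) with
  | some k => kam.getD k 0
  | none => 0

-- ===== PORT B =====
-- 'if best is None or run < best: best = run' and the final such update both compute bMin.
def bMin (best : Option Int) (run : Int) : Int :=
  match best with
  | none => run
  | some b => if run < b then run else b

-- one iteration of B's for-loop; state = (best, run, prev)
def bStep (st : Option Int × Int × Option Int) (x : Int) : Option Int × Int × Option Int :=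
  match st with
  | (best, run, prev) =>
    if 0 < run ∧ prev = some x then (best, run + 1, prev)
    else ((if 0 < run then some (bMin best run) else best), 1, some x)

def func_alt (lst : List Int) : Int :=
  match (PySem.List.sorted lst (fun x => x) false).foldl bStep (none, 0, none) with
  | (best, run, _) =>
    if run = 0 then 0          -- 'raise ValueError' on empty input; outside Pre_
    else bMin best run

-- ===== PRECONDITION & SPEC =====
-- Pre_ excludes only the empty list, on which both Pythons raise ValueError.
def Pre_func (lst : List Int) : Prop := lst ≠ []
instance (lst : List Int) : Decidable (Pre_func lst) := by unfold Pre_func; infer_instance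
def pvWitness_func : List Int := [1, 2, 2]

def Spec_func (lst : List Int) (out : Int) : Prop := out = func_alt lst
instance (lst : List Int) (out : Int) : Decidable (Spec_func lst out) := by unfold Spec_func; infer_instance

-- ===== CLAIM (what is proved, stated in full; the proofs are below) =====
def Claim_equal_func : Prop := ∀ (lst : List Int), Dom_func lst → Pre_func lst → Spec_func lst (func lst)

-- ===== LEMMAS AND PROOFS =====

-- the multiset of per-distinct-element frequencies of s
def counts (s : List Int) : List Int :=
  (PySem.Set.ofList s).map (fun x => (s.count x : Int))

-- folding bMin over a list of counts (the common value both programs compute)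
def mfold (best : Option Int) (cs : List Int) : Option Int :=
  cs.foldl (fun b c => some (bMin b c)) best

theorem bMin_some (b c : Int) : bMin (some b) c = min b c := by
  simp [bMin, min_def]
  omega

theorem mfold_some (b : Int) (cs : List Int) :
    mfold (some b) cs = some (cs.foldl min b) := by
  induction cs generalizing b with
  | nil => rfl
  | cons c t ih => simp [mfold, List.foldl_cons, bMin_some] at *; rw [ih]

-- A's two-branch loop step is exactly Counter's modify step.
theorem func_step_eq_counter_step (d : PySem.Dict Int Int) (i : Int) :
    (if d.contains i then d.modify i 0 (· + 1) else d.insert i 1) = d.modify i 0 (· + 1) := by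
  by_cases h : d.contains i
  · simp [h]
  · have hg : d.get? i = none := by
      simp [PySem.Dict.contains, List.any_eq_true] at h
      simp [PySem.Dict.get?, List.find?_eq_none]
      intro a b hp hb
      exact h b (by rw [← show a = i by simpa using hb]; exact hp)
    simp [h, PySem.Dict.modify, PySem.Dict.getD, hg]

-- distinct elements of y::t = y followed by the distinct elements of t with y removed
theorem foldl_add_cons_of_not_mem (l acc : List Int) (b : Int) (hb : b ∉ l) :
    l.foldl PySem.Set.add (b :: acc) = b :: l.foldl PySem.Set.add acc := by
  induction l generalizing acc with
  | nil => rfl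
  | cons x t ih =>
    have hxb : x ≠ b := fun h => hb (h ▸ List.mem_cons_self)
    have hbt : b ∉ t := fun h => hb (List.mem_cons_of_mem _ h)
    simp only [List.foldl_cons]
    rw [show PySem.Set.add (b :: acc) x = b :: PySem.Set.add acc x by
      simp [PySem.Set.add, PySem.Set.contains, hxb]
      split_ifs <;> simp, ih _ hbt]

theorem foldl_add_filter_of_mem (l acc : List Int) (y : Int) (hy : y ∈ acc) :
    l.foldl PySem.Set.add acc = (l.filter (· ≠ y)).foldl PySem.Set.add acc := by
  induction l generalizing acc with
  | nil => rfl
  | cons x t ih =>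
    by_cases hx : x = y
    · subst hx
      have hadd : PySem.Set.add acc x = acc := by
        simp [PySem.Set.add, PySem.Set.contains, hy]
      simp only [List.foldl_cons, List.filter_cons, show ((x ≠ x) : Bool) = false by simp,
        if_false, hadd]
      exact ih acc hy
    · simp only [List.foldl_cons, List.filter_cons, show ((x ≠ y) : Bool) = true by simp [hx],
        if_true]
      exact ih _ (by simp [PySem.Set.mem_add, hy])

theorem ofList_cons (y : Int) (t : List Int) :
    PySem.Set.ofList (y :: t) = y :: PySem.Set.ofList (t.filter (· ≠ y)) := by
  rw [PySem.Set.ofList_eq_foldl, PySem.Set.ofList_eq_foldl]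
  simp only [List.foldl_cons]
  have h1 : PySem.Set.add [] y = [y] := rfl
  rw [h1, foldl_add_filter_of_mem t [y] y (by simp)]
  exact foldl_add_cons_of_not_mem _ [] y (by simp)

theorem counts_cons (y : Int) (t : List Int) :
    counts (y :: t) = ((t.count y : Int) + 1) :: counts (t.filter (· ≠ y)) := by
  unfold counts
  rw [ofList_cons, List.map_cons]
  congr 1
  · push_cast [List.count_cons_self]; ring
  · apply List.map_congr_left
    intro z hz
    have hzy : z ≠ y := by
      have := (PySem.Set.mem_ofList _ _).1 hz
      simp [List.mem_filter] at this
      exact this.2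
    simp [List.count_filter, hzy, Ne.symm hzy]

-- main invariant of B's scan: mid-run of x with current run length r, remainder s sorted
theorem scan_inv (s : List Int) (x : Int) (best : Option Int) (r : Int) (hr : 0 < r)
    (hs : (x :: s).Pairwise (· ≤ ·)) :
    (match s.foldl bStep (best, r, some x) with
     | (b, run, _) => if run = 0 then 0 else bMin b run)
      = (mfold best ((r + (s.count x : Int)) :: counts (s.filter (· ≠ x)))).getD 0 := by
  induction s generalizing x best r with
  | nil =>
    simp only [List.foldl_nil, List.count_nil, List.filter_nil]
    rw [if_neg (by omega)]
    simp [mfold, counts]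
  | cons y t ih =>
    have hxy : x ≤ y := (List.pairwise_cons.1 hs).1 y List.mem_cons_self
    have hyt : (y :: t).Pairwise (· ≤ ·) := (List.pairwise_cons.1 hs).2
    by_cases hyx : y = x
    · have hstep : bStep (best, r, some x) y = (best, r + 1, some x) := by
        simp [bStep, hr, hyx]
      have hyt' : (x :: t).Pairwise (· ≤ ·) := hyx ▸ hyt
      rw [List.foldl_cons, hstep, ih x best (r + 1) (by omega) hyt']
      have hcnt : r + 1 + ((t.count x : Nat) : Int) = r + (((y :: t).count x : Nat) : Int) := by
        rw [hyx]; push_cast [List.count_cons_self]; ring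
      have hfil : t.filter (· ≠ x) = (y :: t).filter (· ≠ x) := by
        rw [hyx]; simp
      rw [hcnt, hfil]
    · have hxlt : ∀ z ∈ y :: t, x < z := by
        intro z hz
        rcases List.mem_cons.1 hz with h1 | hzt
        · rw [h1]; exact lt_of_le_of_ne hxy (fun e : x = y => hyx e.symm)
        · exact lt_of_lt_of_le (lt_of_le_of_ne hxy (fun e : x = y => hyx e.symm))
            ((List.pairwise_cons.1 hyt).1 z hzt)
      have hstep : bStep (best, r, some x) y = (some (bMin best r), 1, some y) := by
        simp [bStep, hr]
        intro h
        exact absurd h.symm (fun e : y = x => hyx e)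
      rw [List.foldl_cons, hstep, ih y (some (bMin best r)) 1 one_pos hyt]
      have hx0 : (y :: t).count x = 0 := by
        rw [List.count_eq_zero]
        intro hx
        exact absurd rfl (ne_of_lt (hxlt x hx))
      have hxfil : (y :: t).filter (· ≠ x) = y :: t := by
        rw [List.filter_eq_self]
        intro a ha
        simp
        rintro rfl
        exact absurd rfl (ne_of_lt (hxlt a ha))
      rw [hx0, hxfil, counts_cons]
      have hz : r + ((0 : Nat) : Int) = r := by simp
      rw [hz]
      have hm : mfold best (r :: (((t.count y : Nat) : Int) + 1) :: counts (t.filter (· ≠ y)))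
          = mfold (some (bMin best r))
              ((((t.count y : Nat) : Int) + 1) :: counts (t.filter (· ≠ y))) := rfl
      rw [hm]
      have hone : (1 : Int) + ((t.count y : Nat) : Int) = ((t.count y : Nat) : Int) + 1 := by ring
      rw [hone]

theorem alt_eq_mfold (lst : List Int) (h : lst ≠ []) :
    func_alt lst = (mfold none (counts (PySem.List.sorted lst (fun x => x) false))).getD 0 := by
  unfold func_alt
  have hsne : PySem.List.sorted lst (fun x => x) false ≠ [] := by
    rw [ne_eq, PySem.List.sorted_eq_nil_iff]; exact h
  have hsp : (PySem.List.sorted lst (fun x => x) false).Pairwise (· ≤ ·) := by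
    have := PySem.List.sorted_pairwise lst (fun x => x)
    simpa using this
  cases hS : PySem.List.sorted lst (fun x => x) false with
  | nil => exact absurd hS hsne
  | cons x t =>
    rw [hS] at hsp
    have hstep : bStep (none, 0, none) x = (none, 1, some x) := by simp [bStep]
    rw [List.foldl_cons, hstep, scan_inv t x none 1 one_pos hsp, counts_cons]
    have : (1 : Int) + (t.count x : Nat) = ((t.count x : Nat) : Int) + 1 := by ring
    rw [this]

theorem counts_perm (s lst : List Int) (hp : s.Perm lst) : (counts s).Perm (counts lst) := by
  unfold counts
  have hset : (PySem.Set.ofList s).Perm (PySem.Set.ofList lst) := by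
    rw [List.perm_ext_iff_of_nodup (PySem.Set.nodup_ofList s) (PySem.Set.nodup_ofList lst)]
    intro a
    rw [PySem.Set.mem_ofList, PySem.Set.mem_ofList]
    exact hp.mem_iff
  have hcnt : (fun x => ((s.count x : Nat) : Int)) = fun x => ((lst.count x : Nat) : Int) := by
    funext x
    rw [hp.count_eq]
  rw [hcnt]
  exact hset.map _

theorem mfold_eq_min? (cs : List Int) :
    mfold none cs = PySem.List.min? cs (fun y => y) := by
  cases cs with
  | nil => rfl
  | cons c t =>
    rw [PySem.List.min?_id_cons]
    show mfold (some (bMin none c)) t = _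
    rw [mfold_some]
    rfl

theorem min?_id_perm (cs ds : List Int) (hp : cs.Perm ds) :
    PySem.List.min? cs (fun y => y) = PySem.List.min? ds (fun y => y) := by
  cases hc : PySem.List.min? cs (fun y => y) with
  | none =>
    rw [PySem.List.min?_eq_none_iff] at hc
    subst hc
    rw [(PySem.List.min?_eq_none_iff _ _).2 hp.nil_eq.symm]
  | some m =>
    cases hd : PySem.List.min? ds (fun y => y) with
    | none =>
      rw [PySem.List.min?_eq_none_iff] at hd
      subst hd
      rw [(PySem.List.min?_eq_none_iff _ _).2 hp.symm.nil_eq.symm] at hc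
      cases hc
    | some n =>
      have h1 : m ≤ n := PySem.List.min?_isMin hc n (hp.symm.subset (PySem.List.min?_mem hd))
      have h2 : n ≤ m := PySem.List.min?_isMin hd m (hp.subset (PySem.List.min?_mem hc))
      rw [le_antisymm h1 h2]

theorem mfold_perm (cs ds : List Int) (hp : cs.Perm ds) : mfold none cs = mfold none ds := by
  rw [mfold_eq_min?, mfold_eq_min?, min?_id_perm cs ds hp]

theorem min?_cons {A : Type} (f : A → Int) (x : A) (t : List A) :
    PySem.List.min? (x :: t) f = some (t.foldl (fun a y => if f y < f a then y else a) x) := by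
  unfold PySem.List.min?
  rw [List.foldl_cons]
  induction t generalizing x with
  | nil => rfl
  | cons y t ih =>
    by_cases h : f y < f x <;> simp [h, ih]

theorem foldl_min_map {A : Type} (f : A → Int) (t : List A) (x : A) :
    (t.map f).foldl (fun a y => if y < a then y else a) (f x)
      = f (t.foldl (fun a y => if f y < f a then y else a) x) := by
  induction t generalizing x with
  | nil => rfl
  | cons y t ih =>
    by_cases h : f y < f x <;> simp [h, ih]

theorem min?_map_id {A : Type} (xs : List A) (f : A → Int) :
    PySem.List.min? (xs.map f) (fun y => y) = (PySem.List.min? xs f).map f := by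
  cases xs with
  | nil => rfl
  | cons x t =>
    rw [List.map_cons, min?_cons, min?_cons f x t]
    simp [foldl_min_map f t x]

theorem func_eq_mfold (lst : List Int) :
    func lst = (mfold none (counts lst)).getD 0 := by
  unfold func
  have hstep :
      lst.foldl (fun d i => if d.contains i then d.modify i 0 (· + 1) else d.insert i 1)
        PySem.Dict.empty = PySem.Dict.counter lst := by
    rw [PySem.Dict.counter_eq_foldl]
    have hfn : (fun (d : PySem.Dict Int Int) i =>
        if d.contains i then d.modify i 0 (· + 1) else d.insert i 1)
        = fun d i => d.modify i 0 (· + 1) :=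
      funext fun d => funext fun i => func_step_eq_counter_step d i
    rw [hfn]
  simp only [hstep, PySem.Dict.keys_counter, PySem.Dict.getD_counter]
  rw [mfold_eq_min?]
  unfold counts
  rw [min?_map_id]
  cases hm : PySem.List.min? (PySem.Set.ofList lst) (fun k => ((lst.count k : Nat) : Int)) <;> simp

theorem func_eq_alt (lst : List Int) (h : lst ≠ []) : func lst = func_alt lst := by
  rw [func_eq_mfold lst, alt_eq_mfold lst h,
    mfold_perm _ _ (counts_perm _ _ (PySem.List.sorted_perm lst (fun x => x) false))]

-- ===== VERDICT (by name: the statement is the Claim_ definition above) =====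
theorem func_spec : Claim_equal_func := by
  intro lst _ hpre
  unfold Spec_func
  exact func_eq_alt lst hpre
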